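-- pv_equiv track=rewrite | github.com/Zurihaa/CS458-Lab2 | lab2.py | doubletranspositioncipher
-- ===== SOURCE A (Python) =====
-- def doubletranspositioncipher(text, row, column, row_pattern:list, col_pattern:list):
--
--     text = text.replace(" ", "x")
--
--     total = row * column
--     fill = total - len(text)
--
--     if fill > 0:
--         text += "X" * fill
--
--     matrix = []
--
--     for i in range(row):
--         matrix = matrix + [[]]
--         for j in range(column):
--             matrix[i] = matrix[i] + [' ']
--
--     k = 0
--
--     for i in range(row):
--         for j in range(column):
--             matrix[i][j] = text[k]
--             k += 1
--
--     col_matrix = [matrix[i-1] for i in row_pattern]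
--
--     encrypt_matrix = []
--
--     for i in range(row):
--         encrypt_matrix = encrypt_matrix + [[]]
--         for j in range(column):
--             encrypt_matrix[i] = encrypt_matrix[i] + [' ']
--
--     for i in range(row):
--         k = 0
--         for j in col_pattern:
--             encrypt_matrix[i][k] = col_matrix[i][j-1]
--             k += 1
--
--     ciphertext = ""
--     for i in range(row):
--         for j in range(column):
--             ciphertext += encrypt_matrix[i][j]
--
--     return ciphertext
-- ===== SOURCE B (Python) =====
-- def doubletranspositioncipher(text, row, column, row_pattern: list, col_pattern: list):
--     text = text.replace(" ", "x")
--     fill = row * column - len(text)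
--     if fill > 0:
--         text += "X" * fill
--     chunks = [text[i * column:(i + 1) * column] for i in range(row)]
--     rows = [chunks[p - 1] for p in row_pattern]
--     parts = []
--     for i in range(row):
--         out = [' '] * column
--         for k, c in enumerate(col_pattern):
--             out[k] = rows[i][c - 1]
--         parts.append(''.join(out))
--     return ''.join(parts)
-- ===== Notes on version B (the rewrite author's own statement) =====
-- stated objective: simpler
-- what changed: B drops A's three cell-by-cell materialised matrices (blank-matrix building, counter-driven fill, encrypt matrix, final read-out loop) and instead splits the flat padded text into row slices once, picks them in row-key order by list indexing, and writes each output row directly in column-key order.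
import Mathlib
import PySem

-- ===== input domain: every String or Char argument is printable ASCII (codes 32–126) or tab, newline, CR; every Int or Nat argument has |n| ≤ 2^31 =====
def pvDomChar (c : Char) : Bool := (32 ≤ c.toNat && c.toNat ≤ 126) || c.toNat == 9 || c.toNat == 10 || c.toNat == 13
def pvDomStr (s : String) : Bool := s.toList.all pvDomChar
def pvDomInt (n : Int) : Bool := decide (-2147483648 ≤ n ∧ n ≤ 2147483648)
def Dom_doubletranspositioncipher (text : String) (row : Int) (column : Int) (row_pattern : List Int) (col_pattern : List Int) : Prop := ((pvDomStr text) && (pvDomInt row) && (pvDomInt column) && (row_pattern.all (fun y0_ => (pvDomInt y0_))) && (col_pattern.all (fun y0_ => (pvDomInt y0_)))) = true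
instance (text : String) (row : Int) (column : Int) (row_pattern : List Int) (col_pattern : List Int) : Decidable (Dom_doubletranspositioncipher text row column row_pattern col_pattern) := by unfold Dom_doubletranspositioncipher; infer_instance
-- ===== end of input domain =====

-- B replaces A's three cell-by-cell materialised matrices and their permutation passes by
-- slicing the flat padded text into row chunks once, picking chunks in row-key order and
-- writing each output row directly in column-key order (objective: simpler).

-- ===== PORT A =====
-- the twice-repeated Python block "for i in range(row): matrix = matrix + [[]]; for j in range(column): matrix[i] = matrix[i] + [' ']"
def pvAMatrixInit (row column : Int) : List (List Char) :=
  (PySem.List.pyRange 0 row 1).foldl (fun m i =>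
    let m1 := m ++ [([] : List Char)]
    (PySem.List.pyRange 0 column 1).foldl
      (fun m2 _j => PySem.List.pySetD m2 i (PySem.List.pyGetD m2 i [] ++ [' '])) m1) []

def doubletranspositioncipher (text : String) (row : Int) (column : Int)
    (row_pattern : List Int) (col_pattern : List Int) : String :=
  -- text = text.replace(" ", "x")   (the string is kept as List Char; rebuilt with String.mk at the end)
  let t0 : List Char := PySem.Chars.replace text.toList [' '] ['x']
  let total : Int := row * column
  let fill : Int := total - (t0.length : Int)
  -- if fill > 0: text += "X" * fill
  let t : List Char := if fill > 0 then t0 ++ List.replicate fill.toNat 'X' else t0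
  let matrix0 := pvAMatrixInit row column
  -- k = 0; for i in range(row): for j in range(column): matrix[i][j] = text[k]; k += 1
  let fillres :=
    (PySem.List.pyRange 0 row 1).foldl (fun (st : List (List Char) × Int) i =>
      (PySem.List.pyRange 0 column 1).foldl (fun st j =>
        (PySem.List.pySetD st.1 i
           (PySem.List.pySetD (PySem.List.pyGetD st.1 i []) j (PySem.List.pyGetD t st.2 ' ')),
         st.2 + 1)) st) (matrix0, (0 : Int))
  let matrix := fillres.1
  -- col_matrix = [matrix[i-1] for i in row_pattern]
  let col_matrix := row_pattern.map (fun p => PySem.List.pyGetD matrix (p - 1) [])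
  let encrypt0 := pvAMatrixInit row column
  -- for i in range(row): k = 0; for j in col_pattern: encrypt_matrix[i][k] = col_matrix[i][j-1]; k += 1
  let encrypt :=
    (PySem.List.pyRange 0 row 1).foldl (fun em i =>
      (col_pattern.foldl (fun (st : List (List Char) × Int) j =>
        (PySem.List.pySetD st.1 i
           (PySem.List.pySetD (PySem.List.pyGetD st.1 i []) st.2
              (PySem.List.pyGetD (PySem.List.pyGetD col_matrix i []) (j - 1) ' ')),
         st.2 + 1)) (em, (0 : Int))).1) encrypt0
  -- ciphertext = ""; for i in range(row): for j in range(column): ciphertext += encrypt_matrix[i][j]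
  let cs : List Char :=
    (PySem.List.pyRange 0 row 1).foldl (fun cs i =>
      (PySem.List.pyRange 0 column 1).foldl (fun cs j =>
        cs ++ [PySem.List.pyGetD (PySem.List.pyGetD encrypt i []) j ' ']) cs) []
  String.mk cs

-- ===== PORT B =====
def doubletranspositioncipher_alt (text : String) (row : Int) (column : Int)
    (row_pattern : List Int) (col_pattern : List Int) : String :=
  let t0 : List Char := PySem.Chars.replace text.toList [' '] ['x']
  let fill : Int := row * column - (t0.length : Int)
  let t : List Char := if fill > 0 then t0 ++ List.replicate fill.toNat 'X' else t0
  -- chunks = [text[i*column:(i+1)*column] for i in range(row)]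
  let chunks : List (List Char) := (PySem.List.pyRange 0 row 1).map (fun i =>
    PySem.List.slice t (some (i * column)) (some ((i + 1) * column)))
  -- rows = [chunks[p-1] for p in row_pattern]
  let rows := row_pattern.map (fun p => PySem.List.pyGetD chunks (p - 1) [])
  let parts : List (List Char) :=
    (PySem.List.pyRange 0 row 1).foldl (fun parts i =>
      let out := (PySem.List.enumerate col_pattern 0).foldl
        (fun out kc => PySem.List.pySetD out kc.1
          (PySem.List.pyGetD (PySem.List.pyGetD rows i []) (kc.2 - 1) ' '))
        (List.replicate column.toNat ' ')
      parts ++ [out]) ([] : List (List Char))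
  String.mk parts.flatten  -- ''.join(parts)

-- ===== PRECONDITION & SPEC =====
-- Pre_ is exactly the input set on which Python A returns normally (B raises on the same
-- inputs): every row-key entry indexes the row list (Python indexing, so -row ≤ p-1 < row),
-- and when there is a non-empty column key, the row key covers all rows, the column key is no
-- longer than the grid is wide, and its entries index a row of width column.
def Pre_doubletranspositioncipher (text : String) (row : Int) (column : Int) (row_pattern : List Int) (col_pattern : List Int) : Prop :=
  (∀ p ∈ row_pattern, PySem.Raise.InRange row.toNat (p - 1)) ∧
  (0 < row → col_pattern ≠ [] →
    row ≤ (row_pattern.length : Int) ∧ (col_pattern.length : Int) ≤ column ∧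
    ∀ c ∈ col_pattern, PySem.Raise.InRange column.toNat (c - 1))
instance (text : String) (row : Int) (column : Int) (row_pattern : List Int) (col_pattern : List Int) : Decidable (Pre_doubletranspositioncipher text row column row_pattern col_pattern) := by unfold Pre_doubletranspositioncipher; infer_instance

def pvWitness_doubletranspositioncipher : String × Int × Int × List Int × List Int :=
  ("ab cd", 2, 3, [2, 1], [3, 1, 2])

def Spec_doubletranspositioncipher (text : String) (row : Int) (column : Int) (row_pattern : List Int) (col_pattern : List Int) (out : String) : Prop := out = doubletranspositioncipher_alt text row column row_pattern col_pattern
instance (text : String) (row : Int) (column : Int) (row_pattern : List Int) (col_pattern : List Int) (out : String) : Decidable (Spec_doubletranspositioncipher text row column row_pattern col_pattern out) := by unfold Spec_doubletranspositioncipher; infer_instance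

-- ===== CLAIM (what is proved, stated in full; the proofs are below) =====
def Claim_equal_doubletranspositioncipher : Prop := ∀ (text : String) (row : Int) (column : Int) (row_pattern : List Int) (col_pattern : List Int), Dom_doubletranspositioncipher text row column row_pattern col_pattern → Pre_doubletranspositioncipher text row column row_pattern col_pattern → Spec_doubletranspositioncipher text row column row_pattern col_pattern (doubletranspositioncipher text row column row_pattern col_pattern)

-- ===== LEMMAS AND PROOFS =====

-- the write loop both programs run on one row: out[k] = src[c-1] for k,c in enumerate(cp)
def pvW (cp : List Int) (C : Nat) (src : List Char) : List Char :=
  (PySem.List.enumerate cp 0).foldl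
    (fun out kc => PySem.List.pySetD out kc.1 (PySem.List.pyGetD src (kc.2 - 1) ' '))
    (List.replicate C ' ')

-- the row of the filled matrix whose first cell holds t[a]
def pvChunk (t : List Char) (C a : Nat) : List Char :=
  (List.range C).map (fun j => t.getD (a + j) ' ')

-- a Python "k = k0; for x in l: …use k…; k += 1" loop is a fold over enumerate(l, k0)
theorem pv_foldl_counter {α β : Type} (l : List β) (g : α → Int → β → α) (a : α) (k0 : Int) :
    l.foldl (fun st j => (g st.1 st.2 j, st.2 + 1)) (a, k0)
      = ((PySem.List.enumerate l k0).foldl (fun acc p => g acc p.1 p.2) a, k0 + l.length) := by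
  induction l generalizing a k0 with
  | nil => simp [PySem.List.enumerate_nil]
  | cons x xs ih =>
      simp only [List.foldl_cons, PySem.List.enumerate_cons, ih]
      congr 1
      simp only [List.length_cons]
      push_cast; ring

-- a loop that only rewrites row i of the matrix is a set of the fold over that row
theorem pv_foldl_focus {β : Type} (L : List β) (w : List Char → β → List Char) (i : Nat)
    (em : List (List Char)) (hi : i < em.length) :
    L.foldl (fun em p => PySem.List.pySetD em (i : Int) (w (PySem.List.pyGetD em (i : Int) []) p)) em
      = em.set i (L.foldl w (em.getD i [])) := by
  induction L generalizing em with
  | nil =>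
      rw [List.foldl_nil, List.foldl_nil, List.getD_eq_getElem _ _ hi, List.set_getElem_self]
  | cons x xs ih =>
      rw [List.foldl_cons, List.foldl_cons,
        ih _ (by rw [PySem.List.length_pySetD]; exact hi)]
      simp only [PySem.List.pySetD_natCast, PySem.List.pyGetD_natCast]
      have h2 : (em.set i (w (em.getD i []) x)).getD i [] = w (em.getD i []) x := by
        rw [List.getD_eq_getElem _ _ (by simpa using hi)]
        exact List.getElem_set_self (by simpa using hi)
      rw [h2, List.set_set]

-- the init loop builds a row×column blank matrix
theorem pv_inner_init (m : List (List Char)) (l : List Char) (C : Nat) :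
    (List.range C).foldl
      (fun m2 _ => PySem.List.pySetD m2 (m.length : Int) (PySem.List.pyGetD m2 (m.length : Int) [] ++ [' ']))
      (m ++ [l])
      = m ++ [l ++ List.replicate C ' '] := by
  induction C generalizing l with
  | zero => simp
  | succ n ih =>
      rw [List.range_succ, List.foldl_append, ih, List.foldl_cons, List.foldl_nil]
      simp only [PySem.List.pySetD_natCast, PySem.List.pyGetD_natCast]
      rw [List.getD_append_right _ _ _ _ (Nat.le_refl _), Nat.sub_self,
        List.set_append_right _ _ (Nat.le_refl _), Nat.sub_self]
      simp [List.replicate_succ']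

theorem pv_matrixInit (row column : Int) :
    pvAMatrixInit row column
      = List.replicate row.toNat (List.replicate column.toNat ' ') := by
  unfold pvAMatrixInit
  rw [PySem.List.pyRange_zero row, List.foldl_map]
  have h : ∀ n : Nat, n ≤ row.toNat →
      (List.range n).foldl (fun m (i : Nat) =>
        (PySem.List.pyRange 0 column 1).foldl
          (fun m2 _ => PySem.List.pySetD m2 (i : Int) (PySem.List.pyGetD m2 (i : Int) [] ++ [' ']))
          (m ++ [([] : List Char)])) []
      = List.replicate n (List.replicate column.toNat ' ') := by
    intro n hn
    induction n with
    | zero => simp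
    | succ k ih =>
        rw [List.range_succ, List.foldl_append, ih (by omega), List.foldl_cons, List.foldl_nil]
        rw [PySem.List.pyRange_zero column, List.foldl_map]
        have h2 := pv_inner_init (List.replicate k (List.replicate column.toNat ' ')) [] column.toNat
        simp only [List.length_replicate] at h2
        rw [h2]
        simp [List.replicate_succ']
  exact h row.toNat (Nat.le_refl _)

-- the fill loop turns the blank matrix into the list of row-chunks of t, row i starting at t[i*C]
theorem pv_fill_inner (t : List Char) (C i k0 : Nat) (m : List (List Char))
    (hi : i < m.length) (hrow : m.getD i [] = List.replicate C ' ') :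
    ∀ n ≤ C,
    (List.range n).foldl (fun (st : List (List Char) × Int) (j : Nat) =>
        (PySem.List.pySetD st.1 (i : Int)
           (PySem.List.pySetD (PySem.List.pyGetD st.1 (i : Int) []) (j : Int)
             (PySem.List.pyGetD t st.2 ' ')),
         st.2 + 1)) (m, (k0 : Int))
      = (m.set i ((List.range n).map (fun j => t.getD (k0 + j) ' ') ++ List.replicate (C - n) ' '),
         ((k0 + n : Nat) : Int)) := by
  intro n hn
  induction n with
  | zero =>
      simp only [List.range_zero, List.foldl_nil, List.map_nil, List.nil_append, Nat.sub_zero, Nat.add_zero]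
      rw [← hrow, List.getD_eq_getElem _ _ hi, List.set_getElem_self]
  | succ q ih =>
      rw [List.range_succ, List.foldl_append, ih (by omega), List.foldl_cons, List.foldl_nil]
      simp only [PySem.List.pySetD_natCast, PySem.List.pyGetD_natCast]
      have hset : i < (m.set i (List.map (fun j => t.getD (k0 + j) ' ') (List.range q) ++ List.replicate (C - q) ' ')).length := by
        simpa using hi
      have h3 : (m.set i (List.map (fun j => t.getD (k0 + j) ' ') (List.range q) ++ List.replicate (C - q) ' ')).getD i []
          = List.map (fun j => t.getD (k0 + j) ' ') (List.range q) ++ List.replicate (C - q) ' ' := by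
        rw [List.getD_eq_getElem _ _ hset]; exact List.getElem_set_self hset
      rw [h3, List.set_set]
      have hq : (List.map (fun j => t.getD (k0 + j) ' ') (List.range q)).length = q := by simp
      have hrep : List.replicate (C - q) ' ' = ' ' :: List.replicate (C - (q+1)) ' ' := by
        have hcq : C - q = (C - (q+1)) + 1 := by omega
        rw [hcq, List.replicate_succ]
      rw [hrep, List.set_append_right _ _ (by omega), hq, Nat.sub_self, List.set_cons_zero]
      congr 1
      all_goals simp

theorem pv_fill_outer (t : List Char) (R C : Nat) :
    ∀ n ≤ R,
    (List.range n).foldl (fun (st : List (List Char) × Int) (i : Nat) =>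
        (List.range C).foldl (fun st (j : Nat) =>
          (PySem.List.pySetD st.1 (i : Int)
             (PySem.List.pySetD (PySem.List.pyGetD st.1 (i : Int) []) (j : Int)
               (PySem.List.pyGetD t st.2 ' ')),
           st.2 + 1)) st)
      (List.replicate R (List.replicate C ' '), (0 : Int))
      = ((List.range n).map (fun i => pvChunk t C (i * C)) ++ List.replicate (R - n) (List.replicate C ' '),
         ((n * C : Nat) : Int)) := by
  intro n hn
  induction n with
  | zero => simp
  | succ q ih =>
      rw [List.range_succ, List.foldl_append, ih (by omega), List.foldl_cons, List.foldl_nil]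
      have hlen : q < ((List.range q).map (fun i => pvChunk t C (i * C)) ++ List.replicate (R - q) (List.replicate C ' ')).length := by
        simp; omega
      have hrow : ((List.range q).map (fun i => pvChunk t C (i * C)) ++ List.replicate (R - q) (List.replicate C ' ')).getD q []
          = List.replicate C ' ' := by
        rw [List.getD_append_right _ _ _ _ (by simp)]
        simp only [List.length_map, List.length_range, Nat.sub_self]
        have hx : R - q = (R - (q+1)) + 1 := by omega
        rw [hx, List.replicate_succ]
        rfl
      have hfi := pv_fill_inner t C q (q * C) _ hlen hrow C (Nat.le_refl C)
      rw [hfi]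
      have hrep : List.replicate (R - q) (List.replicate C ' ') = List.replicate C ' ' :: List.replicate (R - (q+1)) (List.replicate C ' ') := by
        have hx : R - q = (R - (q+1)) + 1 := by omega
        rw [hx, List.replicate_succ]
      rw [List.set_append_right _ _ (by simp)]
      simp only [List.length_map, List.length_range, Nat.sub_self]
      rw [hrep, List.set_cons_zero]
      congr 1
      all_goals simp [pvChunk, Nat.succ_mul]

-- the encrypt loop: rows are written independently, each from its own source row
theorem pv_enc_outer (cp : List Int) (src : Nat → List Char) (R C : Nat) :
    ∀ n ≤ R,
    (List.range n).foldl (fun em (i : Nat) =>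
        (cp.foldl (fun (st : List (List Char) × Int) c =>
          (PySem.List.pySetD st.1 (i : Int)
             (PySem.List.pySetD (PySem.List.pyGetD st.1 (i : Int) []) st.2
               (PySem.List.pyGetD (src i) (c - 1) ' ')),
           st.2 + 1)) (em, (0 : Int))).1)
      (List.replicate R (List.replicate C ' '))
      = (List.range n).map (fun i => pvW cp C (src i)) ++ List.replicate (R - n) (List.replicate C ' ') := by
  intro n hn
  induction n with
  | zero => simp
  | succ q ih =>
      rw [List.range_succ, List.foldl_append, ih (by omega), List.foldl_cons, List.foldl_nil]
      rw [pv_foldl_counter cp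
        (fun em k c => PySem.List.pySetD em (q : Int)
          (PySem.List.pySetD (PySem.List.pyGetD em (q : Int) []) k
            (PySem.List.pyGetD (src q) (c - 1) ' ')))]
      simp only
      rw [pv_foldl_focus (PySem.List.enumerate cp 0)
        (fun out kc => PySem.List.pySetD out kc.1 (PySem.List.pyGetD (src q) (kc.2 - 1) ' ')) q _
        (by simp; omega)]
      have hrow : ((List.range q).map (fun i => pvW cp C (src i)) ++ List.replicate (R - q) (List.replicate C ' ')).getD q []
          = List.replicate C ' ' := by
        rw [List.getD_append_right _ _ _ _ (by simp)]
        simp only [List.length_map, List.length_range, Nat.sub_self]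
        have hx : R - q = (R - (q+1)) + 1 := by omega
        rw [hx, List.replicate_succ]
        rfl
      rw [hrow]
      rw [List.set_append_right _ _ (by simp)]
      simp only [List.length_map, List.length_range, Nat.sub_self]
      have hrep : List.replicate (R - q) (List.replicate C ' ') = List.replicate C ' ' :: List.replicate (R - (q+1)) (List.replicate C ' ') := by
        have : R - q = (R - (q+1)) + 1 := by omega
        rw [this, List.replicate_succ]
      rw [hrep, List.set_cons_zero]
      simp [pvW]

-- the write fold keeps the row length
theorem pv_W_length (cp : List Int) (C : Nat) (src : List Char) : (pvW cp C src).length = C := by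
  unfold pvW
  have h : ∀ (L : List (Int × Int)) (o : List Char),
      (L.foldl (fun out kc => PySem.List.pySetD out kc.1 (PySem.List.pyGetD src (kc.2 - 1) ' ')) o).length
        = o.length := by
    intro L
    induction L with
    | nil => intro o; rfl
    | cons x xs ih => intro o; rw [List.foldl_cons, ih, PySem.List.length_pySetD]
  rw [h]; simp

-- reading a length-C row cell by cell reproduces the row
theorem pv_readout (l : List Char) (C : Nat) (h : l.length = C) :
    (List.range C).map (fun j => l.getD j ' ') = l := by
  apply List.ext_getElem
  · simp [h]
  · intro k h1 h2
    simp only [List.getElem_map, List.getElem_range]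
    rw [List.getD_eq_getElem _ _ (by omega)]

-- a slice of the flat text is the corresponding matrix row
theorem pv_chunk_slice (t : List Char) (C a : Nat) (h : a + C ≤ t.length) :
    (t.drop a).take C = pvChunk t C a := by
  apply List.ext_getElem
  · simp [pvChunk]; omega
  · intro k h1 h2
    have hk : k < C := by simp at h1; omega
    simp only [pvChunk, List.getElem_take, List.getElem_drop, List.getElem_map, List.getElem_range]
    rw [List.getD_eq_getElem _ _ (by omega)]

-- the padded text is at least as long as the grid
theorem pv_pad_length (t0 : List Char) (row column : Int) (hrow : 0 < row) (hcol : 0 ≤ column) :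
    row.toNat * column.toNat ≤
      (if row * column - (t0.length : Int) > 0
        then t0 ++ List.replicate (row * column - (t0.length : Int)).toNat 'X' else t0).length := by
  have hm : ((row.toNat * column.toNat : Nat) : Int) = row * column := by
    push_cast
    rw [Int.toNat_of_nonneg (le_of_lt hrow), Int.toNat_of_nonneg hcol]
  split_ifs with h
  · rw [List.length_append, List.length_replicate]
    omega
  · omega

-- ===== VERDICT (by name: the statement is the Claim_ definition above) =====
theorem doubletranspositioncipher_spec : Claim_equal_doubletranspositioncipher := by
  intro text row column rp cp _hdom hpre
  unfold Spec_doubletranspositioncipher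
  obtain ⟨_hrpin, hcpc⟩ := hpre
  by_cases hrow : 0 < row
  · unfold doubletranspositioncipher doubletranspositioncipher_alt
    simp only [PySem.List.pyRange_zero, List.foldl_map, List.map_map]
    rw [pv_matrixInit]
    rw [pv_fill_outer _ row.toNat column.toNat row.toNat (Nat.le_refl _)]
    rw [pv_enc_outer cp _ row.toNat column.toNat row.toNat (Nat.le_refl _)]
    simp only [Nat.sub_self, List.replicate_zero, List.append_nil]
    simp only [PySem.List.foldl_append_singleton_eq_map, PySem.List.foldl_append_eq_flatMap,
      List.nil_append, List.flatMap_def]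
    refine congrArg String.mk (congrArg List.flatten ?_)
    apply List.map_congr_left
    intro i hi
    have hiR : i < row.toNat := by simpa using hi
    set t : List Char :=
      (if row * column - ((PySem.Chars.replace text.toList [' '] ['x']).length : Int) > 0
        then PySem.Chars.replace text.toList [' '] ['x'] ++
          List.replicate (row * column - ((PySem.Chars.replace text.toList [' '] ['x']).length : Int)).toNat 'X'
        else PySem.Chars.replace text.toList [' '] ['x']) with ht
    -- A row i, read back cell by cell, is the written row
    rw [PySem.List.pyGetD_natCast, PySem.List.getD_map_range _ _ _ _ hiR]
    simp only [PySem.List.pyGetD_natCast]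
    rw [pv_readout _ _ (pv_W_length cp column.toNat _)]
    by_cases hnil : cp = []
    · subst hnil
      simp [pvW, PySem.List.enumerate_nil]
    · -- B's comprehension of flat slices IS A's filled matrix, row by row
      obtain ⟨hlen, hclen, _hcin⟩ := hcpc hrow hnil
      have hcol : (0 : Int) ≤ column := by omega
      have hmap : List.map (fun k : Nat =>
            PySem.List.slice t (some ((k : Int) * column)) (some (((k : Int) + 1) * column)))
            (List.range row.toNat)
          = List.map (fun a => pvChunk t column.toNat (a * column.toNat)) (List.range row.toNat) := by
        apply List.map_congr_left
        intro k hk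
        have hkR : k < row.toNat := List.mem_range.mp hk
        have h1 : ((k : Int) * column) = ((k * column.toNat : Nat) : Int) := by
          push_cast
          rw [Int.toNat_of_nonneg hcol]
        have h2 : (((k : Int) + 1) * column)
            = ((k * column.toNat : Nat) : Int) + ((column.toNat : Nat) : Int) := by
          push_cast
          rw [Int.toNat_of_nonneg hcol]
          ring
        rw [h1, h2, PySem.List.slice_natCast_add]
        apply pv_chunk_slice
        calc k * column.toNat + column.toNat = (k + 1) * column.toNat := by ring
          _ ≤ row.toNat * column.toNat := Nat.mul_le_mul_right _ (by omega)
          _ ≤ t.length := by rw [ht]; exact pv_pad_length _ row column hrow hcol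
      simp only [Function.comp_def]
      rw [hmap]
      rfl
  · -- row ≤ 0: both loops are empty and both programs return ""
    have h0 : PySem.List.pyRange 0 row 1 = [] := PySem.List.pyRange_one_eq_nil (by omega)
    simp [doubletranspositioncipher, doubletranspositioncipher_alt, pvAMatrixInit, h0]
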